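-- pv_equiv track=rewrite | github.com/baidu/duedge-cli | duedge_cli/utils.py | find_most_match_pattern
-- ===== SOURCE A (Python) =====
-- def find_match_characters(string, pattern):
--     """Find match match pattern string.
--     Args:
--         params: string
--                 pattern
--     Returns:
--     Raises:
--     """
--     matched = []
--     last_index = 0
--
--     if not string or not pattern:
--         return matched
--
--     if string[0] != pattern[0]:
--         return matched
--
--     for c in pattern:
--         index = string.find(c, last_index)
--         if index < 0:
--             return []
--
--         matched.append((c, index))
--         last_index = index + 1
--
--     return matched
--
-- def find_most_match_pattern(string, pattern):
--     """Find most match pattern string.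
--     Args:
--         params: string
--                 pattern
--     Returns:
--     Raises:
--     """
--     result = find_match_characters(string, pattern)
--
--     length = len(string)
--     word = [" "] * length
--     score = 0
--
--     for char, index in result:
--         word[index] = char
--         score -= index + 1
--
--     return "".join(word), score
-- ===== SOURCE B (Python) =====
-- def find_most_match_pattern(string, pattern):
--     """Single-pass two-pointer subsequence scan: walk the string once with a
--     pattern pointer, building the space-padded word and the score directly."""
--     if not string or not pattern or string[0] != pattern[0]:
--         return " " * len(string), 0
--     j = 0
--     chars = []
--     score = 0
--     for i, ch in enumerate(string):
--         if j < len(pattern) and ch == pattern[j]: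
--             chars.append(ch)
--             j += 1
--             score -= i + 1
--         else:
--             chars.append(" ")
--     if j < len(pattern):
--         return " " * len(string), 0
--     return "".join(chars), score
-- ===== Notes on version B (the rewrite author's own statement) =====
-- stated objective: simpler
-- what changed: Replaces the pattern-major str.find loop plus helper and the separate word-array fill with a single helper-free string-major two-pointer scan that builds the padded word and the score in one pass.
import Mathlib
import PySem

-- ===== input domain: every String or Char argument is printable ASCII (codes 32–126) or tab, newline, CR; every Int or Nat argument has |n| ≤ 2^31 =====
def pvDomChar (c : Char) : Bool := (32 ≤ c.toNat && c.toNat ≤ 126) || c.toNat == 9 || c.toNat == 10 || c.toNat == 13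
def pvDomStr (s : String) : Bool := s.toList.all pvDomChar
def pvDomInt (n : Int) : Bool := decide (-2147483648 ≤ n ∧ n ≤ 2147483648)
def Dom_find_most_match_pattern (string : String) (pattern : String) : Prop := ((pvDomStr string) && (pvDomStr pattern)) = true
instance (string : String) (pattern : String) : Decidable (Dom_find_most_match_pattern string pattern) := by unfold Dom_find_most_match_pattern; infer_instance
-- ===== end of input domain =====

-- B replaces A's pattern-major str.find loop (helper find_match_characters + word-array fill)
-- by one helper-free string-major two-pointer scan building the word and score in a single pass;
-- objective: simpler. Equivalence of return values is proved on all inputs (both are total).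

-- ===== PORT A =====
-- the for-loop of find_match_characters: recursion over the remaining pattern chars,
-- carrying last_index and the accumulated matched list; string.find(c, last_index) is
-- PySem.Chars.findFrom with the single-char needle [c]
def find_match_characters_loop (s : List Char) (cs : List Char) (last_index : Nat)
    (matched : List (Char × Int)) : List (Char × Int) :=
  match cs with
  | [] => matched
  | c :: rest =>
    let index := PySem.Chars.findFrom s [c] (last_index : Int)
    if index < 0 then []
    else find_match_characters_loop s rest (index.toNat + 1) (matched ++ [(c, index)])

def find_match_characters (string : String) (pattern : String) : List (Char × Int) :=
  match string.toList, pattern.toList with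
  | [], _ => []
  | _, [] => []
  | s0 :: _, p0 :: _ =>
    if s0 ≠ p0 then []
    else find_match_characters_loop string.toList pattern.toList 0 []

def find_most_match_pattern (string : String) (pattern : String) : String × Int :=
  let result := find_match_characters string pattern
  let length := string.toList.length
  let ws := result.foldl
    (fun (ws : List Char × Int) ci => (ws.1.set ci.2.toNat ci.1, ws.2 - (ci.2 + 1)))
    (List.replicate length ' ', 0)
  (String.mk ws.1, ws.2)

-- ===== PORT B =====
-- the single for-loop of B: walk the string once (current absolute index i), carrying the
-- remaining pattern; emit the matched char or a space, and accumulate the score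
def fmp_scan (xs : List Char) (ps : List Char) (i : Nat) : List Char × List Char × Int :=
  match xs, ps with
  | [], ps => ([], ps, 0)
  | _x :: xs, [] =>
    let r := fmp_scan xs [] (i + 1)
    (' ' :: r.1, r.2.1, r.2.2)
  | x :: xs, c :: cs =>
    if x = c then
      let r := fmp_scan xs cs (i + 1)
      (x :: r.1, r.2.1, r.2.2 - ((i : Int) + 1))
    else
      let r := fmp_scan xs (c :: cs) (i + 1)
      (' ' :: r.1, r.2.1, r.2.2)

def find_most_match_pattern_alt (string : String) (pattern : String) : String × Int :=
  match string.toList, pattern.toList with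
  | [], _ => ("", 0)
  | s0 :: s', [] => (String.mk (List.replicate (s0 :: s').length ' '), 0)
  | s0 :: s', p0 :: p' =>
    if s0 ≠ p0 then (String.mk (List.replicate (s0 :: s').length ' '), 0)
    else
      let r := fmp_scan (s0 :: s') (p0 :: p') 0
      if r.2.1 ≠ [] then (String.mk (List.replicate (s0 :: s').length ' '), 0)
      else (String.mk r.1, r.2.2)

-- ===== PRECONDITION & SPEC =====
def Spec_find_most_match_pattern (string : String) (pattern : String) (out : String × Int) : Prop := out = find_most_match_pattern_alt string pattern
instance (string : String) (pattern : String) (out : String × Int) : Decidable (Spec_find_most_match_pattern string pattern out) := by unfold Spec_find_most_match_pattern; infer_instance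

-- ===== CLAIM (what is proved, stated in full; the proofs are below) =====
def Claim_equal_find_most_match_pattern : Prop := ∀ (string : String) (pattern : String), Dom_find_most_match_pattern string pattern → Spec_find_most_match_pattern string pattern (find_most_match_pattern string pattern)

-- ===== LEMMAS AND PROOFS =====

-- first index of character c in a list (reference function for the proofs)
def firstIdx : List Char → Char → Option Nat
  | [], _ => none
  | x :: xs, c => if x = c then some 0 else (firstIdx xs c).map (· + 1)

-- the greedy leftmost subsequence embedding: the (relative) match positions, or none
def rel : List Char → List Char → Option (List Nat)
  | _, [] => some []
  | xs, c :: cs =>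
    match firstIdx xs c with
    | none => none
    | some j => (rel (xs.drop (j + 1)) cs).map (fun l => j :: l.map (· + (j + 1)))

-- the space-padded word determined by the match positions
def wordRel (xs : List Char) (l : List Nat) : List Char :=
  (List.range xs.length).map (fun t => if t ∈ l then xs.getD t ' ' else ' ')

lemma firstIdx_lt {xs : List Char} {c : Char} {j : Nat} (h : firstIdx xs c = some j) :
    j < xs.length := by
  induction xs generalizing j with
  | nil => simp [firstIdx] at h
  | cons x xs ih =>
    by_cases hx : x = c
    · simp [firstIdx, hx] at h; simp; omega
    · simp [firstIdx, hx] at h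
      obtain ⟨j', hj', rfl⟩ := h
      have := ih hj'; simp; omega

lemma firstIdx_getElem? {xs : List Char} {c : Char} {j : Nat} (h : firstIdx xs c = some j) :
    xs[j]? = some c := by
  induction xs generalizing j with
  | nil => simp [firstIdx] at h
  | cons x xs ih =>
    by_cases hx : x = c
    · simp [firstIdx, hx] at h; subst h; simp [hx]
    · simp [firstIdx, hx] at h
      obtain ⟨j', hj', rfl⟩ := h
      simpa using ih hj'

lemma firstIdx_min {xs : List Char} {c : Char} {j : Nat} (h : firstIdx xs c = some j) :
    ∀ i < j, xs[i]? ≠ some c := by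
  induction xs generalizing j with
  | nil => simp [firstIdx] at h
  | cons x xs ih =>
    by_cases hx : x = c
    · simp [firstIdx, hx] at h; omega
    · simp [firstIdx, hx] at h
      obtain ⟨j', hj', rfl⟩ := h
      intro i hi
      cases i with
      | zero => simpa using hx
      | succ i => simpa using ih hj' i (by omega)

lemma firstIdx_none {xs : List Char} {c : Char} (h : firstIdx xs c = none) : c ∉ xs := by
  induction xs with
  | nil => simp
  | cons x xs ih =>
    by_cases hx : x = c
    · simp [firstIdx, hx] at h
    · simp [firstIdx, hx] at h
      simp [ih h, Ne.symm hx]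

lemma singleton_prefix_drop {s : List Char} {c : Char} {i : Nat} :
    [c] <+: s.drop i ↔ s[i]? = some c := by
  constructor
  · rintro ⟨t, ht⟩
    have : (s.drop i)[0]? = some c := by rw [← ht]; simp
    simpa [List.getElem?_drop] using this
  · intro h
    have : (s.drop i)[0]? = some c := by simpa [List.getElem?_drop] using h
    cases hd : s.drop i with
    | nil => simp [hd] at this
    | cons y ys =>
      simp [hd] at this
      exact ⟨ys, by simp [this]⟩

lemma find_singleton (s : List Char) (c : Char) :
    PySem.Chars.find s [c] = (match firstIdx s c with | none => -1 | some j => (j : Int)) := by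
  cases hf : firstIdx s c with
  | none =>
    have hmem := firstIdx_none hf
    show PySem.Chars.find s [c] = -1
    rw [PySem.Chars.find_eq_neg_one_iff]
    intro hinf
    rcases hinf with ⟨t, u, htu⟩
    apply hmem
    have : c ∈ t ++ [c] ++ u := by simp
    rwa [htu] at this
  | some j =>
    have hj := firstIdx_getElem? hf
    have hpre : [c] <+: s.drop j := singleton_prefix_drop.mpr hj
    have hnonneg : 0 ≤ PySem.Chars.find s [c] := by
      rw [PySem.Chars.find_nonneg_iff]
      exact hpre.isInfix.trans (List.drop_suffix j s).isInfix
    obtain ⟨h1, h2⟩ := PySem.Chars.find_spec hnonneg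
    have hle : (PySem.Chars.find s [c]).toNat ≤ j := by
      by_contra hlt
      exact h2 j (by omega) hpre
    have hge : j ≤ (PySem.Chars.find s [c]).toNat := by
      by_contra hlt
      exact firstIdx_min hf _ (by omega) (singleton_prefix_drop.mp h1)
    show PySem.Chars.find s [c] = (j : Int)
    omega

lemma wordRel_nil (xs : List Char) : wordRel xs [] = List.replicate xs.length ' ' := by
  simp [wordRel, List.map_const']

lemma wordRel_cons_hit (x : Char) (xs : List Char) (l : List Nat) :
    wordRel (x :: xs) (0 :: l.map (· + 1)) = x :: wordRel xs l := by
  simp only [wordRel, List.length_cons, List.range_succ_eq_map, List.map_cons, List.map_map]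
  congr 1
  apply List.map_congr_left
  intro t ht
  simp [Function.comp]

lemma wordRel_cons_miss (x : Char) (xs : List Char) (l : List Nat) :
    wordRel (x :: xs) (l.map (· + 1)) = ' ' :: wordRel xs l := by
  simp only [wordRel, List.length_cons, List.range_succ_eq_map, List.map_cons, List.map_map]
  congr 1
  · simp
  · apply List.map_congr_left
    intro t ht
    simp [Function.comp]

lemma fmp_scan_nil_pattern (xs : List Char) (i : Nat) :
    fmp_scan xs [] i = (List.replicate xs.length ' ', [], 0) := by
  induction xs generalizing i with
  | nil => simp [fmp_scan]
  | cons x xs ih => simp [fmp_scan, ih, List.replicate_succ]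

-- shift lemma: a non-matching head just shifts every match position by one
lemma rel_shift (x : Char) (xs : List Char) (c : Char) (cs : List Char) (hx : x ≠ c) :
    rel (x :: xs) (c :: cs) = (rel xs (c :: cs)).map (fun l => l.map (· + 1)) := by
  simp only [rel, firstIdx, if_neg hx]
  cases hf : firstIdx xs c with
  | none => simp
  | some j =>
    simp only [Option.map_some]
    have hdrop : (x :: xs).drop (j + 1 + 1) = xs.drop (j + 1) := by simp
    rw [hdrop]
    cases hr : rel (xs.drop (j + 1)) cs with
    | none => simp
    | some l =>
      simp only [Option.map_some, Option.some.injEq, List.map_cons, List.map_map]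
      rfl

lemma sum_shift (l : List Nat) (i : Nat) :
    ((l.map (· + 1)).map (fun (j : Nat) => (j : Int) + i + 1)).sum
      = (l.map (fun (j : Nat) => (j : Int) + ((i + 1 : Nat) : Int) + 1)).sum := by
  induction l with
  | nil => simp
  | cons t l ih => simp only [List.map_cons, List.sum_cons, ih]; push_cast; ring

-- B's scan computes the word/score of the greedy embedding (and detects failure)
lemma scan_rel : ∀ (xs cs : List Char) (i : Nat),
    (rel xs cs = none → (fmp_scan xs cs i).2.1 ≠ []) ∧
    (∀ l, rel xs cs = some l →
      fmp_scan xs cs i = (wordRel xs l, [], -((l.map (fun (j : Nat) => (j : Int) + i + 1)).sum))) := by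
  intro xs
  induction xs with
  | nil =>
    intro cs i
    constructor
    · intro h
      cases cs with
      | nil => simp [rel] at h
      | cons c cs' => simp [fmp_scan]
    · intro l h
      cases cs with
      | nil => simp [rel] at h; subst h; simp [fmp_scan, wordRel]
      | cons c cs' => simp [rel, firstIdx] at h
  | cons x xs ih =>
    intro cs i
    cases cs with
    | nil =>
      constructor
      · intro h; simp [rel] at h
      · intro l h
        simp [rel] at h; subst h
        simp [fmp_scan_nil_pattern, wordRel_nil]
    | cons c cs' =>
      by_cases hx : x = c
      · subst hx
        have hrel : rel (x :: xs) (x :: cs') =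
            (rel xs cs').map (fun l => 0 :: l.map (· + 1)) := by
          simp only [rel, firstIdx]
          cases hr : rel ((x :: xs).drop 1) cs' with
          | none => simp at hr; simp [hr]
          | some l => simp at hr; simp [hr]
        constructor
        · intro h
          rw [hrel] at h
          have hnone : rel xs cs' = none := by
            cases hr : rel xs cs' <;> simp [hr] at h ⊢
          have := (ih cs' (i + 1)).1 hnone
          simpa [fmp_scan] using this
        · intro l h
          rw [hrel] at h
          cases hr : rel xs cs' with
          | none => simp [hr] at h
          | some l' =>
            simp [hr] at h
            subst h
            have hihl := (ih cs' (i + 1)).2 l' hr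
            have hstep : fmp_scan (x :: xs) (x :: cs') i =
                (x :: (fmp_scan xs cs' (i + 1)).1, (fmp_scan xs cs' (i + 1)).2.1,
                  (fmp_scan xs cs' (i + 1)).2.2 - ((i : Int) + 1)) := by
              simp [fmp_scan]
            rw [hstep, hihl, wordRel_cons_hit]
            simp only [Prod.mk.injEq, true_and]
            simp only [List.map_cons, List.sum_cons, sum_shift]
            push_cast; ring
      · have hrel := rel_shift x xs c cs' hx
        constructor
        · intro h
          rw [hrel] at h
          have hnone : rel xs (c :: cs') = none := by
            cases hr : rel xs (c :: cs') <;> simp [hr] at h ⊢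
          have := (ih (c :: cs') (i + 1)).1 hnone
          simpa [fmp_scan, hx] using this
        · intro l h
          rw [hrel] at h
          cases hr : rel xs (c :: cs') with
          | none => simp [hr] at h
          | some l' =>
            simp [hr] at h
            subst h
            have hihl := (ih (c :: cs') (i + 1)).2 l' hr
            have hstep : fmp_scan (x :: xs) (c :: cs') i =
                (' ' :: (fmp_scan xs (c :: cs') (i + 1)).1, (fmp_scan xs (c :: cs') (i + 1)).2.1,
                  (fmp_scan xs (c :: cs') (i + 1)).2.2) := by
              simp [fmp_scan, hx]
            rw [hstep, hihl, wordRel_cons_miss]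
            simp only [Prod.mk.injEq, true_and]
            simp only [sum_shift]

-- A's helper loop computes the same greedy embedding, with absolute indices
lemma loopA_rel (s : List Char) : ∀ (cs : List Char) (k : Nat) (m : List (Char × Int)),
    k ≤ s.length →
    find_match_characters_loop s cs k m =
      (match rel (s.drop k) cs with
       | none => []
       | some l => m ++ (cs.zip l).map (fun q => (q.1, ((q.2 + k : Nat) : Int)))) := by
  intro cs
  induction cs with
  | nil => intro k m hk; simp [find_match_characters_loop, rel]
  | cons c cs' ih =>
    intro k m hk
    have hfind := PySem.Chars.findFrom_natCast s [c] k hk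
    rw [find_singleton] at hfind
    cases hf : firstIdx (s.drop k) c with
    | none =>
      rw [hf] at hfind
      simp only [find_match_characters_loop, hfind]
      norm_num
      simp [rel, hf]
    | some j =>
      rw [hf] at hfind
      have hjlt : j < (s.drop k).length := firstIdx_lt hf
      have hk' : k + j + 1 ≤ s.length := by
        rw [List.length_drop] at hjlt; omega
      have hidx : PySem.Chars.findFrom s [c] (k : Int) = ((k + j : Nat) : Int) := by
        rw [hfind, if_neg (by omega : ¬ ((j : Int) = -1))]; push_cast; ring
      simp only [find_match_characters_loop, hidx]
      rw [if_neg (by omega), show (((k + j : Nat) : Int)).toNat + 1 = k + j + 1 by omega,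
        ih (k + j + 1) (m ++ [(c, ((k + j : Nat) : Int))]) hk']
      simp only [rel, hf, List.drop_drop]
      have harith : k + (j + 1) = k + j + 1 := rfl
      rw [harith]
      cases hr : rel (s.drop (k + j + 1)) cs' with
      | none => simp
      | some l' =>
        simp only [Option.map_some, List.zip_cons_cons, List.map_cons, List.zip_map_right,
          List.map_map, List.append_assoc, List.singleton_append]
        refine congrArg (m ++ ·) ?_
        refine congrArg₂ (· :: ·) (by simp [Nat.add_comm]) ?_
        apply List.map_congr_left
        intro q _
        simp [Function.comp, Prod.map]
        ring

-- soundness facts about the greedy embedding needed to compare the two word constructions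
lemma rel_sound : ∀ (cs xs : List Char) (l : List Nat), rel xs cs = some l →
    l.length = cs.length ∧ List.Pairwise (· < ·) l ∧ (∀ j ∈ l, j < xs.length) ∧
    (∀ q ∈ cs.zip l, xs[q.2]? = some q.1) := by
  intro cs
  induction cs with
  | nil => intro xs l h; simp [rel] at h; subst h; simp
  | cons c cs' ih =>
    intro xs l h
    cases hf : firstIdx xs c with
    | none => simp [rel, hf] at h
    | some j =>
      simp only [rel, hf] at h
      cases hr : rel (xs.drop (j + 1)) cs' with
      | none => rw [hr] at h; simp at h
      | some l' =>
        rw [hr] at h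
        simp at h
        subst h
        obtain ⟨hlen, hpw, hb, hch⟩ := ih (xs.drop (j + 1)) l' hr
        have hjlt : j < xs.length := firstIdx_lt hf
        refine ⟨by simp [hlen], ?_, ?_, ?_⟩
        · constructor
          · intro b hb'
            simp at hb'
            obtain ⟨t, _, rfl⟩ := hb'
            omega
          · rw [List.pairwise_map]
            exact hpw.imp (by intro a b hab; omega)
        · intro t ht
          simp at ht
          rcases ht with rfl | ⟨t', ht', rfl⟩
          · exact hjlt
          · have := hb t' ht'
            rw [List.length_drop] at this
            omega
        · intro q hq
          simp only [List.zip_cons_cons, List.zip_map_right, List.mem_cons, List.mem_map] at hq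
          rcases hq with rfl | ⟨q', hq', rfl⟩
          · exact firstIdx_getElem? hf
          · have := hch q' hq'
            rw [List.getElem?_drop] at this
            simpa [Prod.map, Nat.add_comm] using this

lemma foldl_pair {α β γ : Type} (L : List α) (F : β × γ → α → β × γ)
    (f : β → α → β) (g : γ → α → γ) (hF : ∀ p x, F p x = (f p.1 x, g p.2 x))
    (a : β) (b : γ) : L.foldl F (a, b) = (L.foldl f a, L.foldl g b) := by
  induction L generalizing a b with
  | nil => rfl
  | cons x L ih => rw [List.foldl_cons, hF]; exact ih _ _

lemma foldl_set_int (P : List (Char × Nat)) (w : List Char) :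
    (P.map (fun q => (q.1, ((q.2 : Nat) : Int)))).foldl
      (fun w ci => w.set ci.2.toNat ci.1) w
      = P.foldl (fun w q => w.set q.2 q.1) w := by
  induction P generalizing w with
  | nil => rfl
  | cons q P ih => simp [List.foldl_cons, ih]

lemma foldl_score_int (P : List (Char × Nat)) (sc : Int) :
    (P.map (fun q => (q.1, ((q.2 : Nat) : Int)))).foldl
      (fun sc ci => sc - (ci.2 + 1)) sc
      = sc - ((P.map (fun q => ((q.2 : Nat) : Int) + 1)).sum) := by
  induction P generalizing sc with
  | nil => simp
  | cons q P ih => simp [List.foldl_cons, ih]; ring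

lemma foldl_set_getElem? : ∀ (M : List (Char × Nat)) (w : List Char) (t : Nat),
    List.Pairwise (fun a b => a.2 < b.2) M → (∀ q ∈ M, q.2 < w.length) →
    (M.foldl (fun w q => w.set q.2 q.1) w)[t]? =
      (match M.find? (fun q => q.2 == t) with
       | some q => some q.1
       | none => w[t]?) := by
  intro M
  induction M with
  | nil => intro w t _ _; rfl
  | cons q M ih =>
    intro w t hpw hb
    obtain ⟨hhead, htail⟩ := List.pairwise_cons.mp hpw
    have hb' : ∀ q' ∈ M, q'.2 < (w.set q.2 q.1).length := by
      intro q' hq'; rw [List.length_set]; exact hb q' (List.mem_cons_of_mem _ hq')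
    rw [List.foldl_cons, ih (w.set q.2 q.1) t htail hb', List.find?_cons]
    by_cases hqt : q.2 = t
    · subst hqt
      have hnone : M.find? (fun q' => q'.2 == q.2) = none := by
        rw [List.find?_eq_none]
        intro x hx
        simp only [beq_iff_eq]
        have := hhead x hx
        omega
      simp only [hnone, beq_self_eq_true]
      rw [List.getElem?_set]
      simp [hb q (List.mem_cons_self)]
    · have : (q.2 == t) = false := by simp [hqt]
      simp only [this]
      have hset : (w.set q.2 q.1)[t]? = w[t]? := by
        rw [List.getElem?_set, if_neg hqt]
      cases M.find? (fun q' => q'.2 == t) <;> simp [hset]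

-- the word built by A's set-loop equals the word of the match positions
lemma word_eq (s p : List Char) (l : List Nat)
    (hlen : l.length = p.length) (hpw : List.Pairwise (· < ·) l)
    (hb : ∀ j ∈ l, j < s.length) (hch : ∀ q ∈ p.zip l, s[q.2]? = some q.1) :
    (p.zip l).foldl (fun w q => w.set q.2 q.1) (List.replicate s.length ' ') = wordRel s l := by
  have hmap : (p.zip l).map Prod.snd = l := List.map_snd_zip (by omega)
  have hpw' : List.Pairwise (fun a b : Char × Nat => a.2 < b.2) (p.zip l) := by
    rw [← List.pairwise_map (f := Prod.snd), hmap]; exact hpw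
  have hb' : ∀ q ∈ p.zip l, q.2 < (List.replicate s.length ' ').length := by
    intro q hq
    rw [List.length_replicate]
    exact hb q.2 (by rw [← hmap]; exact List.mem_map_of_mem hq)
  apply List.ext_getElem?
  intro t
  rw [foldl_set_getElem? _ _ _ hpw' hb']
  cases hfind : (p.zip l).find? (fun q => q.2 == t) with
  | some q =>
    have hq2 : q.2 = t := by simpa using List.find?_some hfind
    have hqmem : q ∈ p.zip l := List.mem_of_find?_eq_some hfind
    have htl : t ∈ l := by rw [← hmap]; exact hq2 ▸ List.mem_map_of_mem hqmem
    have htlt : t < s.length := hb t htl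
    have hst : s[t]? = some q.1 := hq2 ▸ hch q hqmem
    simp only [wordRel]
    rw [List.getElem?_map, List.getElem?_range htlt]
    simp [htl, List.getD_eq_getElem?_getD, hst]
  | none =>
    have htl : t ∉ l := by
      intro htl
      rw [← hmap] at htl
      obtain ⟨q, hq, hq2⟩ := List.mem_map.mp htl
      rw [List.find?_eq_none] at hfind
      exact hfind q hq (by simp [hq2])
    simp only [wordRel]
    by_cases htlt : t < s.length
    · rw [List.getElem?_map, List.getElem?_range htlt]
      simp [htl, htlt]
    · rw [List.getElem?_eq_none (by simpa using htlt), List.getElem?_eq_none (by simp; omega)]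

-- assembly: the two ports agree on every input
lemma ab_eq (string pattern : String) :
    find_most_match_pattern string pattern = find_most_match_pattern_alt string pattern := by
  cases hs : string.toList with
  | nil =>
    simp [find_most_match_pattern, find_most_match_pattern_alt, find_match_characters, hs]
    rfl
  | cons s0 s' =>
    cases hp : pattern.toList with
    | nil =>
      simp [find_most_match_pattern, find_most_match_pattern_alt, find_match_characters, hs, hp]
    | cons p0 p' =>
      by_cases hsp : s0 = p0
      · subst hsp
        have h0 : (0 : Nat) ≤ (s0 :: s').length := Nat.zero_le _
        have hloop0 := loopA_rel (s0 :: s') (s0 :: p') 0 [] h0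
        rw [List.drop_zero] at hloop0
        cases hr : rel (s0 :: s') (s0 :: p') with
        | none =>
          rw [hr] at hloop0
          have hloop : find_match_characters_loop (s0 :: s') (s0 :: p') 0 [] = [] := by
            rw [hloop0]
          have hscan := (scan_rel (s0 :: s') (s0 :: p') 0).1 hr
          simp only [find_most_match_pattern, find_most_match_pattern_alt,
            find_match_characters, hs, hp]
          simp [hloop, hscan]
        | some l =>
          rw [hr] at hloop0
          have hloop : find_match_characters_loop (s0 :: s') (s0 :: p') 0 []
              = ((s0 :: p').zip l).map (fun q => (q.1, ((q.2 + 0 : Nat) : Int))) := by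
            rw [hloop0]
            rfl
          have hscan := (scan_rel (s0 :: s') (s0 :: p') 0).2 l hr
          obtain ⟨hlen, hpw, hb, hch⟩ := rel_sound (s0 :: p') (s0 :: s') l hr
          simp only [find_most_match_pattern, find_most_match_pattern_alt,
            find_match_characters, hs, hp]
          rw [if_neg (by simp), hloop, hscan, if_neg (by simp)]
          have hM : ((s0 :: p').zip l).map (fun q => (q.1, ((q.2 + 0 : Nat) : Int)))
              = ((s0 :: p').zip l).map (fun q => (q.1, ((q.2 : Nat) : Int))) := by
            simp
          rw [hM]
          have hsplit := foldl_pair (((s0 :: p').zip l).map (fun q => (q.1, ((q.2 : Nat) : Int))))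
            (fun ws ci => (ws.1.set ci.2.toNat ci.1, ws.2 - (ci.2 + 1)))
            (fun w ci => w.set ci.2.toNat ci.1) (fun sc ci => sc - (ci.2 + 1))
            (fun p x => rfl) (List.replicate (s0 :: s').length ' ') 0
          rw [hsplit, foldl_set_int, foldl_score_int]
          rw [show ((s0 :: p').zip l).foldl (fun w q => w.set q.2 q.1)
              (List.replicate (s0 :: s').length ' ') = wordRel (s0 :: s') l from
            word_eq (s0 :: s') (s0 :: p') l hlen hpw hb hch]
          have hsc : (0 : Int) - ((((s0 :: p').zip l).map (fun q => ((q.2 : Nat) : Int) + 1)).sum)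
              = -((l.map (fun (j : Nat) => (j : Int) + ((0 : Nat) : Int) + 1)).sum) := by
            have h2 : (fun (q : Char × Nat) => ((q.2 : Nat) : Int) + 1)
                = (fun (j : Nat) => (j : Int) + ((0 : Nat) : Int) + 1) ∘ Prod.snd := by
              funext q; simp only [Function.comp_apply]; push_cast; ring
            rw [h2, ← List.map_map, List.map_snd_zip (by omega)]
            ring
          rw [hsc]
          simp
      · simp [find_most_match_pattern, find_most_match_pattern_alt,
          find_match_characters, hs, hp, hsp]

-- ===== VERDICT (by name: the statement is the Claim_ definition above) =====
theorem find_most_match_pattern_spec : Claim_equal_find_most_match_pattern := by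
  intro string pattern _
  unfold Spec_find_most_match_pattern
  exact ab_eq string pattern
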